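-- pv_equiv track=rewrite | github.com/yonsweng/ps | codeforces/1627/b.py | solve
-- ===== SOURCE A (Python) =====
-- from collections import deque
--
-- DIRECTION = [(-1, 0), (0, -1), (0, 1), (1, 0)]
--
-- def solve(n, m):
--     grid = [[0] * m for _ in range(n)]
--     s = set([((n-1)//2, (m-1)//2), ((n-1)//2, m//2), (n//2, (m-1)//2), (n//2, m//2)])
--     q = deque()
--     for i, j in s:
--         grid[i][j] = n//2 + m//2
--         q.append((i, j))
--     while len(q) > 0:
--         i, j = q.popleft()
--         for di, dj in DIRECTION:
--             if 0<=i+di<n and 0<=j+dj<m and grid[i+di][j+dj] == 0: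
--                 grid[i+di][j+dj] = grid[i][j] + 1
--                 q.append((i+di, j+dj))
--     arr = []
--     for i in range(n):
--         for j in range(m):
--             arr.append(grid[i][j])
--     return ' '.join(map(str, sorted(arr)))
-- ===== SOURCE B (Python) =====
-- def solve(n, m):
--     # closed form: the BFS value of cell (i, j) is max(i, n-1-i) + max(j, m-1-j);
--     # build a histogram of these values and emit them in increasing order (counting sort).
--     cnt = {}
--     for i in range(n):
--         ri = max(i, n - 1 - i)
--         for j in range(m):
--             v = ri + max(j, m - 1 - j)
--             cnt[v] = cnt.get(v, 0) + 1
--     out = []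
--     for v in range(n + m):
--         out.extend([str(v)] * cnt.get(v, 0))
--     return ' '.join(out)
-- ===== Notes on version B (the rewrite author's own statement) =====
-- stated objective: faster
-- what changed: Replaces the BFS flood fill plus comparison sort with the closed-form cell value max(i,n-1-i)+max(j,m-1-j) and a counting-sort histogram over the bounded value range 0..n+m-1.
import Mathlib
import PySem

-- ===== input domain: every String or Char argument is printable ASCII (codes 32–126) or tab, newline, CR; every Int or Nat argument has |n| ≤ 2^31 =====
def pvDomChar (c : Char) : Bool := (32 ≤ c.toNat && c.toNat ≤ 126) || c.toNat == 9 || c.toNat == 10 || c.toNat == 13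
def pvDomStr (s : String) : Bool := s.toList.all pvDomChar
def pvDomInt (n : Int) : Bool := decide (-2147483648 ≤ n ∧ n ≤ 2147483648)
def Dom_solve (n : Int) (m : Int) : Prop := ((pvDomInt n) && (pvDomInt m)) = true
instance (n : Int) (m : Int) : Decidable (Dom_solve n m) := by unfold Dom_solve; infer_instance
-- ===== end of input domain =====

-- B replaces A's BFS flood fill + comparison sort by the closed-form cell value and a
-- counting-sort histogram (objective: faster, asymptotic). Equivalence is about the return
-- value only (A mutates only its own locals). The 2-D grid of A is modelled as a function
-- (Int × Int) → Int; inside Pre_solve every Python grid access A performs is in range, so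
-- this is exact there.

-- ===== PORT A =====
def pvDirs : List (Int × Int) := [(-1, 0), (0, -1), (0, 1), (1, 0)]

-- grid[i][j] read / write on the 2-D array (all BFS accesses are bounds-guarded as in A)
def pvGet (G : Array (Array Int)) (c : Int × Int) : Int :=
  (G.getD c.1.toNat #[]).getD c.2.toNat 0

def pvSet (G : Array (Array Int)) (c : Int × Int) (v : Int) : Array (Array Int) :=
  G.modify c.1.toNat (fun row => row.setIfInBounds c.2.toNat v)

-- the inner 'for di, dj in DIRECTION' loop of A's while-loop body
def pvNbrs (n m : Int) (h : Int × Int) (dirs : List (Int × Int)) (G : Array (Array Int)) :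
    Array (Array Int) × List (Int × Int) :=
  match dirs with
  | [] => (G, [])
  | d :: ds =>
    if 0 ≤ h.1 + d.1 ∧ h.1 + d.1 < n ∧ 0 ≤ h.2 + d.2 ∧ h.2 + d.2 < m ∧
        pvGet G (h.1 + d.1, h.2 + d.2) = 0 then
      let r := pvNbrs n m h ds (pvSet G (h.1 + d.1, h.2 + d.2) (pvGet G h + 1))
      (r.1, (h.1 + d.1, h.2 + d.2) :: r.2)
    else pvNbrs n m h ds G

-- A's 'while len(q) > 0' loop; the fuel only makes the recursion structural, each
-- iteration is exactly one iteration of A's loop (the fuel is proved sufficient below)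
def pvBFS (n m : Int) (fuel : Nat) (G : Array (Array Int)) (q : List (Int × Int)) :
    Array (Array Int) :=
  match fuel, q with
  | 0, _ => G
  | _ + 1, [] => G
  | fuel + 1, h :: t =>
    let r := pvNbrs n m h pvDirs G
    pvBFS n m fuel r.1 (t ++ r.2)

def solve (n : Int) (m : Int) : String :=
  let s : List (Int × Int) := PySem.Set.ofList
    [(PySem.Int.floordiv (n - 1) 2, PySem.Int.floordiv (m - 1) 2),
     (PySem.Int.floordiv (n - 1) 2, PySem.Int.floordiv m 2),
     (PySem.Int.floordiv n 2, PySem.Int.floordiv (m - 1) 2),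
     (PySem.Int.floordiv n 2, PySem.Int.floordiv m 2)]
  let g0 : Array (Array Int) := Array.replicate n.toNat (Array.replicate m.toNat 0)
  let g1 := s.foldl (fun G c => pvSet G c (PySem.Int.floordiv n 2 + PySem.Int.floordiv m 2)) g0
  let gF := pvBFS n m (2 * (n.toNat * m.toNat) + 4) g1 s
  let arr := (PySem.List.pyRange 0 n).foldl
    (fun a i => (PySem.List.pyRange 0 m).foldl (fun a j => a ++ [pvGet gF (i, j)]) a) []
  PySem.Str.join " " ((PySem.List.sorted arr (fun x => x)).map PySem.Int.toStr)

-- ===== PORT B =====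
def solve_alt (n : Int) (m : Int) : String :=
  let cnt := (PySem.List.pyRange 0 n).foldl
    (fun (cnt : PySem.Dict Int Int) i =>
      (PySem.List.pyRange 0 m).foldl
        (fun cnt j =>
          cnt.insert (max i (n - 1 - i) + max j (m - 1 - j))
            (cnt.getD (max i (n - 1 - i) + max j (m - 1 - j)) 0 + 1))
        cnt)
    PySem.Dict.empty
  let out := (PySem.List.pyRange 0 (n + m)).foldl
    (fun out v => out ++ PySem.List.pyRepeat [PySem.Int.toStr v] (cnt.getD v 0)) []
  PySem.Str.join " " out

-- ===== PRECONDITION & SPEC =====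
-- A raises IndexError when n < 1 or m < 1 (it indexes into an empty grid); Pre_ excludes exactly those inputs.
def Pre_solve (n : Int) (m : Int) : Prop := 1 ≤ n ∧ 1 ≤ m
instance (n : Int) (m : Int) : Decidable (Pre_solve n m) := by unfold Pre_solve; infer_instance
def pvWitness_solve : Int × Int := (3, 4)

def Spec_solve (n : Int) (m : Int) (out : String) : Prop := out = solve_alt n m
instance (n : Int) (m : Int) (out : String) : Decidable (Spec_solve n m out) := by unfold Spec_solve; infer_instance

-- ===== CLAIM (what is proved, stated in full; the proofs are below) =====
def Claim_equal_solve : Prop := ∀ (n : Int) (m : Int), Dom_solve n m → Pre_solve n m → Spec_solve n m (solve n m)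

-- ===== LEMMAS AND PROOFS =====

def pvIn (n m : Int) (c : Int × Int) : Prop := 0 ≤ c.1 ∧ c.1 < n ∧ 0 ≤ c.2 ∧ c.2 < m


def pvF (n m : Int) (c : Int × Int) : Int := max c.1 (n - 1 - c.1) + max c.2 (m - 1 - c.2)

def pvGrid (n m : Int) : Finset (Int × Int) :=
  ((PySem.List.pyRange 0 n).flatMap (fun i => (PySem.List.pyRange 0 m).map (fun j => (i, j)))).toFinset

def pvZC (n m : Int) (g : Int × Int → Int) : Nat := ((pvGrid n m).filter (fun c => g c = 0)).card

lemma mem_pvGrid (n m : Int) (c : Int × Int) : c ∈ pvGrid n m ↔ pvIn n m c := by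
  obtain ⟨i, j⟩ := c
  simp [pvGrid, pvIn, List.mem_flatMap, PySem.List.mem_pyRange_one]
  tauto

lemma pvF_nonneg (n m : Int) (c : Int × Int) (h : pvIn n m c) : 0 ≤ pvF n m c := by
  obtain ⟨i, j⟩ := c; unfold pvIn at h; unfold pvF; dsimp only at *; omega

lemma pvF_lt (n m : Int) (c : Int × Int) (h : pvIn n m c) : pvF n m c < n + m := by
  obtain ⟨i, j⟩ := c; unfold pvIn at h; unfold pvF; dsimp only at *; omega

lemma pvF_min (n m : Int) (c : Int × Int) (h : pvIn n m c) : n / 2 + m / 2 ≤ pvF n m c := by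
  obtain ⟨i, j⟩ := c; unfold pvIn at h; unfold pvF; dsimp only at *; omega

lemma pvCenter_iff (n m : Int) (hn : 1 ≤ n) (hm : 1 ≤ m) (i j : Int) :
    (pvIn n m (i, j) ∧ pvF n m (i, j) = n / 2 + m / 2) ↔
    ((i = (n - 1) / 2 ∨ i = n / 2) ∧ (j = (m - 1) / 2 ∨ j = m / 2)) := by
  unfold pvIn pvF; dsimp only; omega

lemma pvFd2 (a : Int) : PySem.Int.floordiv a 2 = a / 2 :=
  PySem.Int.floordiv_eq_ediv_of_pos (by norm_num)

lemma pvDirs_neg (d : Int × Int) (h : d ∈ pvDirs) : (-d.1, -d.2) ∈ pvDirs := by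
  fin_cases h <;> decide

lemma pvF_adj (n m : Int) (c : Int × Int) (d : Int × Int) (hd : d ∈ pvDirs)
    (h1 : pvIn n m c) (h2 : pvIn n m (c.1 + d.1, c.2 + d.2)) :
    pvF n m c - 1 ≤ pvF n m (c.1 + d.1, c.2 + d.2) ∧
    pvF n m (c.1 + d.1, c.2 + d.2) ≤ pvF n m c + 1 := by
  obtain ⟨i, j⟩ := c
  fin_cases hd <;> (unfold pvIn at h1 h2; unfold pvF; dsimp only at *; omega)

lemma pvDescend (n m : Int) (i j : Int) (hin : pvIn n m (i, j))
    (hgt : n / 2 + m / 2 < pvF n m (i, j)) :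
    ∃ d ∈ pvDirs, pvIn n m (i + d.1, j + d.2) ∧
      pvF n m (i + d.1, j + d.2) = pvF n m (i, j) - 1 := by
  unfold pvIn at hin; unfold pvF at hgt; dsimp only at hin hgt
  have hcase : 2 * i > n ∨ 2 * i < n - 2 ∨ 2 * j > m ∨ 2 * j < m - 2 := by omega
  rcases hcase with hx | hx | hx | hx
  · exact ⟨(-1, 0), by decide, by unfold pvIn; dsimp only; omega, by unfold pvF; dsimp only; omega⟩
  · exact ⟨(1, 0), by decide, by unfold pvIn; dsimp only; omega, by unfold pvF; dsimp only; omega⟩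
  · exact ⟨(0, -1), by decide, by unfold pvIn; dsimp only; omega, by unfold pvF; dsimp only; omega⟩
  · exact ⟨(0, 1), by decide, by unfold pvIn; dsimp only; omega, by unfold pvF; dsimp only; omega⟩

def pvUpd (g : Int × Int → Int) (c : Int × Int) (v : Int) : Int × Int → Int :=
  fun x => if x = c then v else g x

-- function-level model of A's inner direction loop (proof layer)
def pvNbrsF (n m : Int) (h : Int × Int) (dirs : List (Int × Int)) (g : Int × Int → Int) :
    (Int × Int → Int) × List (Int × Int) :=
  match dirs with
  | [] => (g, [])
  | d :: ds =>
    if 0 ≤ h.1 + d.1 ∧ h.1 + d.1 < n ∧ 0 ≤ h.2 + d.2 ∧ h.2 + d.2 < m ∧ g (h.1 + d.1, h.2 + d.2) = 0 then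
      let r := pvNbrsF n m h ds (pvUpd g (h.1 + d.1, h.2 + d.2) (g h + 1))
      (r.1, (h.1 + d.1, h.2 + d.2) :: r.2)
    else pvNbrsF n m h ds g

-- function-level model of A's while loop (proof layer)
def pvBFSF (n m : Int) (fuel : Nat) (g : Int × Int → Int) (q : List (Int × Int)) :
    Int × Int → Int :=
  match fuel, q with
  | 0, _ => g
  | _ + 1, [] => g
  | fuel + 1, h :: t =>
    let r := pvNbrsF n m h pvDirs g
    pvBFSF n m fuel r.1 (t ++ r.2)

lemma pvNbrs_spec (n m : Int) (h : Int × Int) (dirs : List (Int × Int)) (g : Int × Int → Int)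
    (hne : ∀ d ∈ dirs, (h.1 + d.1, h.2 + d.2) ≠ h) (hpos : 0 ≤ g h) :
    (∀ x, (pvNbrsF n m h dirs g).1 x = if x ∈ (pvNbrsF n m h dirs g).2 then g h + 1 else g x) ∧
    (∀ x ∈ (pvNbrsF n m h dirs g).2, pvIn n m x ∧ g x = 0 ∧ ∃ d ∈ dirs, x = (h.1 + d.1, h.2 + d.2)) ∧
    (∀ d ∈ dirs, pvIn n m (h.1 + d.1, h.2 + d.2) → (pvNbrsF n m h dirs g).1 (h.1 + d.1, h.2 + d.2) ≠ 0) ∧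
    (pvNbrsF n m h dirs g).2.Nodup := by
  induction dirs generalizing g with
  | nil => simp [pvNbrsF]
  | cons d ds ih =>
    have hne' : ∀ d' ∈ ds, (h.1 + d'.1, h.2 + d'.2) ≠ h := fun d' hd' => hne d' (by simp [hd'])
    have hdh : (h.1 + d.1, h.2 + d.2) ≠ h := hne d (by simp)
    by_cases hc : 0 ≤ h.1 + d.1 ∧ h.1 + d.1 < n ∧ 0 ≤ h.2 + d.2 ∧ h.2 + d.2 < m ∧ g (h.1 + d.1, h.2 + d.2) = 0
    · -- discovered branch
      set c := (h.1 + d.1, h.2 + d.2) with hcdef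
      have hg1h : pvUpd g c (g h + 1) h = g h := by simp [pvUpd, Ne.symm hdh]
      obtain ⟨I1, I2, I3, I4⟩ := ih (pvUpd g c (g h + 1)) hne' (by rw [hg1h]; exact hpos)
      have hres : pvNbrsF n m h (d :: ds) g =
          ((pvNbrsF n m h ds (pvUpd g c (g h + 1))).1,
            c :: (pvNbrsF n m h ds (pvUpd g c (g h + 1))).2) := by
        rw [pvNbrsF]; rw [← hcdef, if_pos hc]
      rw [hres]
      have hcnot : c ∉ (pvNbrsF n m h ds (pvUpd g c (g h + 1))).2 := by
        intro hmem
        have := (I2 c hmem).2.1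
        simp [pvUpd] at this
        omega
      refine ⟨?_, ?_, ?_, ?_⟩
      · intro x
        by_cases hx : x = c
        · subst hx
          rw [I1 c, if_neg hcnot]
          simp [pvUpd]
        · rw [I1 x]
          simp only [List.mem_cons, hx, false_or]
          by_cases hx2 : x ∈ (pvNbrsF n m h ds (pvUpd g c (g h + 1))).2
          · simp [hx2, hg1h]
          · simp [hx2, pvUpd, hx]
      · intro x hx
        rcases List.mem_cons.mp hx with hx | hx
        · subst hx; exact ⟨⟨hc.1, hc.2.1, hc.2.2.1, hc.2.2.2.1⟩, hc.2.2.2.2, d, by simp, rfl⟩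
        · obtain ⟨hin, hz, d', hd', hx'⟩ := I2 x hx
          refine ⟨hin, ?_, d', by simp [hd'], hx'⟩
          have hxc : x ≠ c := by
            intro hxx; subst hxx
            simp [pvUpd] at hz; omega
          simpa [pvUpd, hxc] using hz
      · intro d' hd' hin
        rcases List.mem_cons.mp hd' with hd' | hd'
        · subst hd'
          rw [I1 c, if_neg hcnot]
          simp [pvUpd]
          omega
        · exact I3 d' hd' hin
      · exact List.nodup_cons.mpr ⟨hcnot, I4⟩
    · -- skipped branch
      obtain ⟨I1, I2, I3, I4⟩ := ih g hne' hpos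
      have hres : pvNbrsF n m h (d :: ds) g = pvNbrsF n m h ds g := by
        rw [pvNbrsF]; simp only [if_neg hc]
      rw [hres]
      refine ⟨I1, ?_, ?_, I4⟩
      · intro x hx
        obtain ⟨hin, hz, d', hd', hx'⟩ := I2 x hx
        exact ⟨hin, hz, d', by simp [hd'], hx'⟩
      · intro d' hd' hin
        rcases List.mem_cons.mp hd' with hd' | hd'
        · subst hd'
          unfold pvIn at hin; dsimp only at hin
          have hgc : g (h.1 + d'.1, h.2 + d'.2) ≠ 0 := by tauto
          rw [I1]
          split
          · omega
          · exact hgc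
        · exact I3 d' hd' hin

lemma pvZC_override (n m : Int) (g g' : Int × Int → Int) (new : List (Int × Int)) (w : Int)
    (hw : w ≠ 0) (hnd : new.Nodup) (hmem : ∀ x ∈ new, pvIn n m x ∧ g x = 0)
    (hg' : ∀ x, g' x = if x ∈ new then w else g x) :
    pvZC n m g' + new.length = pvZC n m g := by
  have hset : (pvGrid n m).filter (fun c => g' c = 0) =
      ((pvGrid n m).filter (fun c => g c = 0)) \ new.toFinset := by
    ext x
    simp only [Finset.mem_filter, Finset.mem_sdiff, List.mem_toFinset]
    constructor
    · rintro ⟨hx, hz⟩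
      rw [hg' x] at hz
      by_cases hxn : x ∈ new
      · rw [if_pos hxn] at hz; exact absurd hz hw
      · rw [if_neg hxn] at hz; exact ⟨⟨hx, hz⟩, hxn⟩
    · rintro ⟨⟨hx, hz⟩, hxn⟩
      refine ⟨hx, ?_⟩
      rw [hg' x, if_neg hxn]; exact hz
  have hsub : new.toFinset ⊆ (pvGrid n m).filter (fun c => g c = 0) := by
    intro x hx
    rw [List.mem_toFinset] at hx
    obtain ⟨hin, hz⟩ := hmem x hx
    exact Finset.mem_filter.mpr ⟨(mem_pvGrid n m x).mpr hin, hz⟩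
  have hcard : new.toFinset.card = new.length := List.toFinset_card_of_nodup hnd
  unfold pvZC
  rw [hset, Finset.card_sdiff, Finset.inter_eq_left.mpr hsub, hcard]
  have := Finset.card_le_card hsub
  omega

def pvInv (n m : Int) (g : Int × Int → Int) (q : List (Int × Int)) : Prop :=
  (∀ x, 0 ≤ g x) ∧
  (∀ c, pvIn n m c → g c ≠ 0 → g c = pvF n m c) ∧
  (∀ e ∈ q, pvIn n m e ∧ g e ≠ 0) ∧
  (∃ v q1 q2, q = q1 ++ q2 ∧ (q ≠ [] → q1 ≠ []) ∧ (∀ e ∈ q1, pvF n m e = v) ∧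
    (∀ e ∈ q2, pvF n m e = v + 1) ∧ (∀ c, pvIn n m c → g c = 0 → v + 1 ≤ pvF n m c)) ∧
  (∀ c, pvIn n m c → g c = 0 → ∃ d ∈ pvDirs, pvIn n m (c.1 + d.1, c.2 + d.2) ∧
    pvF n m (c.1 + d.1, c.2 + d.2) = pvF n m c - 1 ∧
    (g (c.1 + d.1, c.2 + d.2) = 0 ∨ (c.1 + d.1, c.2 + d.2) ∈ q))

lemma pvInv_nil (n m : Int) (g : Int × Int → Int) (hInv : pvInv n m g [])
    (c : Int × Int) (hc : pvIn n m c) : g c ≠ 0 := by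
  obtain ⟨hN, hA, hB, hC, hD⟩ := hInv
  intro hz
  -- the set of undiscovered cells is nonempty; take one of minimal closed-form value
  have hne : ((pvGrid n m).filter (fun x => g x = 0)).Nonempty :=
    ⟨c, Finset.mem_filter.mpr ⟨(mem_pvGrid n m c).mpr hc, hz⟩⟩
  obtain ⟨x, hx, hmin⟩ := Finset.exists_min_image _ (pvF n m) hne
  rw [Finset.mem_filter, mem_pvGrid] at hx
  obtain ⟨d, hd, hdin, hdf, hdq⟩ := hD x hx.1 hx.2
  rcases hdq with hdz | hdq
  · have := hmin _ (Finset.mem_filter.mpr ⟨(mem_pvGrid n m _).mpr hdin, hdz⟩)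
    omega
  · simp at hdq

lemma pvStep (n m : Int) (g : Int × Int → Int) (h : Int × Int) (t : List (Int × Int))
    (hInv : pvInv n m g (h :: t)) :
    pvInv n m (pvNbrsF n m h pvDirs g).1 (t ++ (pvNbrsF n m h pvDirs g).2) ∧
    2 * pvZC n m (pvNbrsF n m h pvDirs g).1 + (t ++ (pvNbrsF n m h pvDirs g).2).length + 1 ≤
      2 * pvZC n m g + (h :: t).length := by
  obtain ⟨hN, hA, hB, ⟨v, q1, q2, hq, hq1ne, hf1, hf2, hund⟩, hD⟩ := hInv
  -- the head of the queue belongs to the first layer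
  obtain ⟨t1, rfl, ht⟩ : ∃ t1, q1 = h :: t1 ∧ t = t1 ++ q2 := by
    cases q1 with
    | nil => exact absurd (hq1ne (by simp)) (by simp)
    | cons a t1 =>
      rw [List.cons_append] at hq
      injection hq with h1 h2
      exact ⟨t1, by rw [h1], h2⟩
  obtain ⟨hhin, hhnz⟩ := hB h (by simp)
  have hfh : pvF n m h = v := hf1 h (by simp)
  have hgh : g h = v := by rw [hA h hhin hhnz, hfh]
  have hghpos : 0 ≤ g h := hN h
  have hne : ∀ d ∈ pvDirs, (h.1 + d.1, h.2 + d.2) ≠ h := by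
    intro d hd
    fin_cases hd <;> (intro heq; rw [Prod.ext_iff] at heq; dsimp only at heq; omega)
  obtain ⟨S1, S2, S3, S4⟩ := pvNbrs_spec n m h pvDirs g hne hghpos
  set r1 := (pvNbrsF n m h pvDirs g).1 with hr1
  set new := (pvNbrsF n m h pvDirs g).2 with hnew
  -- every newly discovered cell sits in the next layer
  have hnewf : ∀ x ∈ new, pvF n m x = v + 1 := by
    intro x hx
    obtain ⟨hin, hz, d, hd, rfl⟩ := S2 x hx
    have := pvF_adj n m h d hd hhin hin
    have := hund _ hin hz
    omega
  have hzc : pvZC n m r1 + new.length = pvZC n m g :=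
    pvZC_override n m g r1 new (g h + 1) (by omega) S4
      (fun x hx => ⟨(S2 x hx).1, (S2 x hx).2.1⟩) S1
  -- undiscovered cells of the new state were undiscovered before and are not new
  have hu' : ∀ c, r1 c = 0 → g c = 0 ∧ c ∉ new := by
    intro c hc
    rw [S1 c] at hc
    by_cases hcn : c ∈ new
    · rw [if_pos hcn] at hc; omega
    · rw [if_neg hcn] at hc; exact ⟨hc, hcn⟩
  -- the "d = h" witness case is impossible for cells left undiscovered
  have hwit_h : ∀ c, pvIn n m c → r1 c = 0 → ∀ d ∈ pvDirs, (c.1 + d.1, c.2 + d.2) = h → False := by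
    intro c hc hcz d hd heq
    have hnd : (-d.1, -d.2) ∈ pvDirs := pvDirs_neg d hd
    have hceq : (h.1 + -d.1, h.2 + -d.2) = c := by
      rw [Prod.ext_iff] at heq ⊢; dsimp only at *; omega
    have := S3 (-d.1, -d.2) hnd (by rw [hceq]; exact hc)
    rw [hceq] at this
    exact this hcz
  refine ⟨⟨?_, ?_, ?_, ?_, ?_⟩, ?_⟩
  · -- nonneg
    intro x
    rw [S1 x]; split <;> [omega; exact hN x]
  · -- values
    intro c hc hcz
    rw [S1 c] at hcz ⊢
    by_cases hcn : c ∈ new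
    · rw [if_pos hcn]; rw [hnewf c hcn, hgh]
    · rw [if_neg hcn] at hcz ⊢; exact hA c hc hcz
  · -- queue members in range and discovered
    intro e he
    rcases List.mem_append.mp he with he | he
    · obtain ⟨hin, hnz⟩ := hB e (by simp [he])
      refine ⟨hin, ?_⟩
      rw [S1 e]; split <;> omega
    · refine ⟨(S2 e he).1, ?_⟩
      rw [S1 e, if_pos he]; omega
  · -- layered queue
    by_cases ht1 : t1 = ([] : List (Int × Int))
    · -- the v-layer is exhausted: every still-undiscovered cell is at least two layers up
      have hstrong : ∀ c, pvIn n m c → r1 c = 0 → v + 2 ≤ pvF n m c := by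
        intro c hc hcz
        obtain ⟨hgz, hcn⟩ := hu' c hcz
        have h1 : v + 1 ≤ pvF n m c := hund c hc hgz
        by_cases heq : pvF n m c = v + 1
        · exfalso
          obtain ⟨d, hd, hdin, hdf, hdq⟩ := hD c hc hgz
          rcases hdq with hdz | hdq
          · have := hund _ hdin hdz; omega
          · rcases List.mem_cons.mp hdq with hdh | hdt
            · exact hwit_h c hc hcz d hd hdh
            · rw [ht, ht1, List.nil_append] at hdt
              have := hf2 _ hdt; omega
        · omega
      refine ⟨v + 1, q2 ++ new, [], by rw [ht, ht1]; simp, ?_, ?_, by simp, ?_⟩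
      · intro hq'
        rw [ht, ht1, List.nil_append] at hq'
        exact hq'
      · intro e he
        rcases List.mem_append.mp he with he | he
        · exact hf2 e he
        · exact hnewf e he
      · intro c hc hcz; have := hstrong c hc hcz; omega
    · refine ⟨v, t1, q2 ++ new, by rw [ht, List.append_assoc], fun _ => ht1, ?_, ?_, ?_⟩
      · exact fun e he => hf1 e (by simp [he])
      · intro e he
        rcases List.mem_append.mp he with he | he
        · exact hf2 e he
        · exact hnewf e he
      · intro c hc hcz
        exact hund c hc (hu' c hcz).1
  · -- descent witnesses survive
    intro c hc hcz
    obtain ⟨hgz, hcn⟩ := hu' c hcz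
    obtain ⟨d, hd, hdin, hdf, hdq⟩ := hD c hc hgz
    refine ⟨d, hd, hdin, hdf, ?_⟩
    rcases hdq with hdz | hdq
    · by_cases hdn : (c.1 + d.1, c.2 + d.2) ∈ new
      · exact Or.inr (List.mem_append.mpr (Or.inr hdn))
      · refine Or.inl ?_
        rw [S1, if_neg hdn]; exact hdz
    · rcases List.mem_cons.mp hdq with hdh | hdt
      · exact absurd hdh (fun hdh => hwit_h c hc hcz d hd hdh)
      · exact Or.inr (List.mem_append.mpr (Or.inl hdt))
  · -- the measure decreases
    have hlen : (t ++ new).length = t.length + new.length := List.length_append ..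
    simp only [List.length_cons, hlen]
    omega

lemma pvBFS_correct (n m : Int) (fuel : Nat) (g : Int × Int → Int) (q : List (Int × Int))
    (hInv : pvInv n m g q) (hfuel : 2 * pvZC n m g + q.length ≤ fuel)
    (c : Int × Int) (hc : pvIn n m c) : pvBFSF n m fuel g q c = pvF n m c := by
  induction fuel generalizing g q with
  | zero =>
    have hq : q = [] := by
      cases q with
      | nil => rfl
      | cons a t => simp at hfuel
    subst hq
    rw [pvBFSF]
    exact (hInv.2.1 c hc (pvInv_nil n m g hInv c hc)).symm ▸
      (hInv.2.1 c hc (pvInv_nil n m g hInv c hc))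
  | succ fuel ih =>
    cases q with
    | nil =>
      rw [pvBFSF]
      exact hInv.2.1 c hc (pvInv_nil n m g hInv c hc)
    | cons h t =>
      rw [pvBFSF]
      obtain ⟨hInv', hmeas⟩ := pvStep n m g h t hInv
      simp only [List.length_cons] at hfuel hmeas
      exact ih _ _ hInv' (by omega)

def pvS (n m : Int) : List (Int × Int) := PySem.Set.ofList
  [(PySem.Int.floordiv (n - 1) 2, PySem.Int.floordiv (m - 1) 2),
   (PySem.Int.floordiv (n - 1) 2, PySem.Int.floordiv m 2),
   (PySem.Int.floordiv n 2, PySem.Int.floordiv (m - 1) 2),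
   (PySem.Int.floordiv n 2, PySem.Int.floordiv m 2)]

def pvG1 (n m : Int) : Int × Int → Int :=
  (pvS n m).foldl
    (fun g c => pvUpd g c (PySem.Int.floordiv n 2 + PySem.Int.floordiv m 2)) (fun _ => 0)

lemma mem_pvS (n m : Int) (hn : 1 ≤ n) (hm : 1 ≤ m) (x : Int × Int) :
    x ∈ pvS n m ↔ pvIn n m x ∧ pvF n m x = n / 2 + m / 2 := by
  obtain ⟨i, j⟩ := x
  rw [pvS, PySem.Set.mem_ofList, pvCenter_iff n m hn hm i j]
  simp only [List.mem_cons, List.not_mem_nil, or_false, Prod.ext_iff, pvFd2]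
  tauto

lemma pvFoldUpd (l : List (Int × Int)) (b : Int) (g : Int × Int → Int) (x : Int × Int) :
    (l.foldl (fun g c => pvUpd g c b) g) x = if x ∈ l then b else g x := by
  induction l generalizing g with
  | nil => simp
  | cons c l ih =>
    rw [List.foldl_cons, ih]
    by_cases hx : x ∈ l
    · simp [hx]
    · by_cases hxc : x = c <;> simp [hx, hxc, pvUpd]

lemma pvG1_eq (n m : Int) (x : Int × Int) :
    pvG1 n m x = if x ∈ pvS n m then n / 2 + m / 2 else 0 := by
  rw [pvG1, pvFoldUpd, pvFd2, pvFd2]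

lemma pvInit_inv (n m : Int) (hn : 1 ≤ n) (hm : 1 ≤ m) (hnot : ¬(n = 1 ∧ m = 1)) :
    pvInv n m (pvG1 n m) (pvS n m) := by
  have hbase : n / 2 + m / 2 ≠ 0 := by omega
  have hbasepos : 0 ≤ n / 2 + m / 2 := by omega
  refine ⟨?_, ?_, ?_, ?_, ?_⟩
  · intro x; rw [pvG1_eq]; split <;> omega
  · intro c hc hnz
    rw [pvG1_eq] at hnz ⊢
    by_cases hcs : c ∈ pvS n m
    · rw [if_pos hcs]
      exact ((mem_pvS n m hn hm c).mp hcs).2.symm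
    · rw [if_neg hcs] at hnz; omega
  · intro e he
    obtain ⟨hin, hf⟩ := (mem_pvS n m hn hm e).mp he
    exact ⟨hin, by rw [pvG1_eq, if_pos he]; omega⟩
  · refine ⟨n / 2 + m / 2, pvS n m, [], (List.append_nil _).symm, fun h => h, ?_, by simp, ?_⟩
    · exact fun e he => ((mem_pvS n m hn hm e).mp he).2
    · intro c hc hz
      rw [pvG1_eq] at hz
      have hcs : c ∉ pvS n m := by intro hcs; rw [if_pos hcs] at hz; omega
      have := pvF_min n m c hc
      have : pvF n m c ≠ n / 2 + m / 2 := fun heq => hcs ((mem_pvS n m hn hm c).mpr ⟨hc, heq⟩)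
      omega
  · intro c hc hz
    rw [pvG1_eq] at hz
    have hcs : c ∉ pvS n m := by intro hcs; rw [if_pos hcs] at hz; omega
    have h1 := pvF_min n m c hc
    have h2 : pvF n m c ≠ n / 2 + m / 2 := fun heq => hcs ((mem_pvS n m hn hm c).mpr ⟨hc, heq⟩)
    obtain ⟨i, j⟩ := c
    obtain ⟨d, hd, hdin, hdf⟩ := pvDescend n m i j hc (by omega)
    refine ⟨d, hd, hdin, hdf, ?_⟩
    by_cases hds : ((i, j).1 + d.1, (i, j).2 + d.2) ∈ pvS n m
    · exact Or.inr hds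
    · exact Or.inl (by rw [pvG1_eq, if_neg hds])

lemma pvGrid_card (n m : Int) : (pvGrid n m).card ≤ n.toNat * m.toNat := by
  refine le_trans (List.toFinset_card_le _) ?_
  simp [List.length_flatMap, PySem.List.length_pyRange_one]

lemma pvS_len (n m : Int) : (pvS n m).length ≤ 4 :=
  le_trans (PySem.Set.length_ofList_le _) (by simp)

lemma pvFuel (n m : Int) :
    2 * pvZC n m (pvG1 n m) + (pvS n m).length ≤ 2 * (n.toNat * m.toNat) + 4 := by
  have h1 : pvZC n m (pvG1 n m) ≤ n.toNat * m.toNat :=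
    le_trans (Finset.card_filter_le _ _) (pvGrid_card n m)
  have h2 := pvS_len n m
  omega

-- the grid A's BFS computes is exactly the closed form, on every in-range cell

lemma pvGridFinal (n m : Int) (hn : 1 ≤ n) (hm : 1 ≤ m) (hnot : ¬(n = 1 ∧ m = 1))
    (c : Int × Int) (hc : pvIn n m c) :
    pvBFSF n m (2 * (n.toNat * m.toNat) + 4) (pvG1 n m) (pvS n m) c = pvF n m c :=
  pvBFS_correct n m _ _ _ (pvInit_inv n m hn hm hnot) (pvFuel n m) c hc

-- ----- the array grid of port A simulates the functional grid of the proof layer -----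
lemma pvArr_getD {a : Type} (xs : Array a) (i : Nat) (d : a) (h : i < xs.size) :
    xs.getD i d = xs[i] := by
  simp [Array.getD, h]

def pvRel (n m : Int) (G : Array (Array Int)) (g : Int × Int → Int) : Prop :=
  G.size = n.toNat ∧ (∀ i : Nat, i < G.size → (G.getD i #[]).size = m.toNat) ∧
  (∀ c, pvIn n m c → pvGet G c = g c)

lemma pvGet_set_eq (n m : Int) (G : Array (Array Int))
    (hsz : G.size = n.toNat) (hrow : ∀ i : Nat, i < G.size → (G.getD i #[]).size = m.toNat)
    (c : Int × Int) (hc : pvIn n m c) (v : Int) (x : Int × Int) (hx : pvIn n m x) :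
    pvGet (pvSet G c v) x = if x = c then v else pvGet G x := by
  obtain ⟨ci, cj⟩ := c; obtain ⟨xi, xj⟩ := x
  obtain ⟨hc1, hc2, hc3, hc4⟩ := hc; obtain ⟨hx1, hx2, hx3, hx4⟩ := hx
  dsimp only at *
  have hci : ci.toNat < G.size := by omega
  have hxi : xi.toNat < G.size := by omega
  have hrx : G[xi.toNat].size = m.toNat := by
    have := hrow _ hxi
    rwa [pvArr_getD _ _ _ hxi] at this
  have houter : (G.modify ci.toNat fun row => row.setIfInBounds cj.toNat v).getD xi.toNat #[]
      = if ci.toNat = xi.toNat then G[xi.toNat].setIfInBounds cj.toNat v else G[xi.toNat] := by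
    rw [pvArr_getD _ xi.toNat #[] (by rw [Array.size_modify]; exact hxi),
      Array.getElem_modify]
  unfold pvSet pvGet
  dsimp only
  rw [houter, pvArr_getD G xi.toNat #[] hxi]
  by_cases hij : ci.toNat = xi.toNat
  · rw [if_pos hij]
    rw [pvArr_getD (G[xi.toNat].setIfInBounds cj.toNat v) xj.toNat 0
        (by rw [Array.size_setIfInBounds]; omega),
      Array.getElem_setIfInBounds (by omega)]
    by_cases hj2 : cj.toNat = xj.toNat
    · rw [if_pos hj2, if_pos (by rw [Prod.ext_iff]; dsimp only; omega)]
    · rw [if_neg hj2, if_neg (by rw [Prod.ext_iff]; dsimp only; omega),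
        pvArr_getD G[xi.toNat] xj.toNat 0 (by omega)]
  · rw [if_neg hij, if_neg (by rw [Prod.ext_iff]; dsimp only; omega)]

lemma pvSet_rel (n m : Int) (G : Array (Array Int)) (g : Int × Int → Int)
    (hrel : pvRel n m G g) (c : Int × Int) (hc : pvIn n m c) (v : Int) :
    pvRel n m (pvSet G c v) (pvUpd g c v) := by
  obtain ⟨hsz, hrow, hval⟩ := hrel
  refine ⟨by rw [pvSet, Array.size_modify, hsz], ?_, ?_⟩
  · intro i hi
    rw [pvSet, Array.size_modify] at hi
    rw [pvSet, pvArr_getD _ _ _ (by rw [Array.size_modify]; exact hi), Array.getElem_modify]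
    split
    · rw [Array.size_setIfInBounds, ← pvArr_getD _ _ #[] hi]
      exact hrow i hi
    · rw [← pvArr_getD _ _ #[] hi]
      exact hrow i hi
  · intro x hx
    rw [pvGet_set_eq n m G hsz hrow c hc v x hx, pvUpd]
    by_cases hxc : x = c
    · simp [hxc]
    · simp [hxc, hval x hx]

lemma pvNbrs_sim (n m : Int) (h : Int × Int) (hh : pvIn n m h) (dirs : List (Int × Int))
    (G : Array (Array Int)) (g : Int × Int → Int) (hrel : pvRel n m G g) :
    (pvNbrs n m h dirs G).2 = (pvNbrsF n m h dirs g).2 ∧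
    pvRel n m (pvNbrs n m h dirs G).1 (pvNbrsF n m h dirs g).1 := by
  induction dirs generalizing G g with
  | nil => exact ⟨rfl, hrel⟩
  | cons d ds ih =>
    have hcond : (0 ≤ h.1 + d.1 ∧ h.1 + d.1 < n ∧ 0 ≤ h.2 + d.2 ∧ h.2 + d.2 < m ∧
        pvGet G (h.1 + d.1, h.2 + d.2) = 0) ↔
        (0 ≤ h.1 + d.1 ∧ h.1 + d.1 < n ∧ 0 ≤ h.2 + d.2 ∧ h.2 + d.2 < m ∧
        g (h.1 + d.1, h.2 + d.2) = 0) := by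
      constructor
      · rintro ⟨h1, h2, h3, h4, h5⟩
        exact ⟨h1, h2, h3, h4, by rw [← hrel.2.2 _ ⟨h1, h2, h3, h4⟩]; exact h5⟩
      · rintro ⟨h1, h2, h3, h4, h5⟩
        exact ⟨h1, h2, h3, h4, by rw [hrel.2.2 _ ⟨h1, h2, h3, h4⟩]; exact h5⟩
    rw [pvNbrs, pvNbrsF]
    by_cases hcf : 0 ≤ h.1 + d.1 ∧ h.1 + d.1 < n ∧ 0 ≤ h.2 + d.2 ∧ h.2 + d.2 < m ∧
        g (h.1 + d.1, h.2 + d.2) = 0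
    · rw [if_pos (hcond.mpr hcf), if_pos hcf]
      have hcin : pvIn n m (h.1 + d.1, h.2 + d.2) := ⟨hcf.1, hcf.2.1, hcf.2.2.1, hcf.2.2.2.1⟩
      have hgh : pvGet G h = g h := hrel.2.2 h hh
      rw [hgh]
      obtain ⟨e1, e2⟩ := ih _ _ (pvSet_rel n m G g hrel _ hcin (g h + 1))
      exact ⟨by simp only [e1], e2⟩
    · rw [if_neg (fun hca => hcf (hcond.mp hca)), if_neg hcf]
      exact ih _ _ hrel

lemma pvDirs_ne (h : Int × Int) : ∀ d ∈ pvDirs, (h.1 + d.1, h.2 + d.2) ≠ h := by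
  intro d hd
  fin_cases hd <;> (intro heq; rw [Prod.ext_iff] at heq; dsimp only at heq; omega)

lemma pvBFS_sim (n m : Int) (fuel : Nat) (G : Array (Array Int)) (g : Int × Int → Int)
    (q : List (Int × Int)) (hrel : pvRel n m G g) (hq : ∀ e ∈ q, pvIn n m e)
    (hg0 : ∀ x, 0 ≤ g x) (c : Int × Int) (hc : pvIn n m c) :
    pvGet (pvBFS n m fuel G q) c = pvBFSF n m fuel g q c := by
  induction fuel generalizing G g q with
  | zero => rw [pvBFS, pvBFSF]; exact hrel.2.2 c hc
  | succ fuel ih =>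
    cases q with
    | nil => rw [pvBFS, pvBFSF]; exact hrel.2.2 c hc
    | cons h t =>
      rw [pvBFS, pvBFSF]
      have hh := hq h (by simp)
      obtain ⟨e1, e2⟩ := pvNbrs_sim n m h hh pvDirs G g hrel
      obtain ⟨S1, S2, S3, S4⟩ := pvNbrs_spec n m h pvDirs g (pvDirs_ne h) (hg0 h)
      rw [e1]
      apply ih _ _ _ e2
      · intro e he
        rcases List.mem_append.mp he with he | he
        · exact hq e (by simp [he])
        · exact (S2 e he).1
      · intro x
        rw [S1 x]
        split
        · have := hg0 h; omega
        · exact hg0 x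

def pvG1A (n m : Int) : Array (Array Int) :=
  (pvS n m).foldl (fun G c => pvSet G c (PySem.Int.floordiv n 2 + PySem.Int.floordiv m 2))
    (Array.replicate n.toNat (Array.replicate m.toNat 0))

lemma pvFold_rel (n m : Int) (l : List (Int × Int)) (hl : ∀ c ∈ l, pvIn n m c) (b : Int)
    (G : Array (Array Int)) (g : Int × Int → Int) (hrel : pvRel n m G g) :
    pvRel n m (l.foldl (fun G c => pvSet G c b) G) (l.foldl (fun g c => pvUpd g c b) g) := by
  induction l generalizing G g with
  | nil => exact hrel
  | cons c l ih =>
    exact ih (fun x hx => hl x (by simp [hx])) _ _ (pvSet_rel n m G g hrel c (hl c (by simp)) b)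

lemma pvRel_init (n m : Int) :
    pvRel n m (Array.replicate n.toNat (Array.replicate m.toNat 0)) (fun _ => 0) := by
  refine ⟨Array.size_replicate, ?_, ?_⟩
  · intro i hi
    rw [Array.size_replicate] at hi
    rw [pvArr_getD _ _ _ (by rw [Array.size_replicate]; exact hi), Array.getElem_replicate,
      Array.size_replicate]
  · intro c hc
    obtain ⟨i, j⟩ := c
    obtain ⟨h1, h2, h3, h4⟩ := hc
    unfold pvGet
    dsimp only at *
    rw [show (Array.replicate n.toNat (Array.replicate m.toNat (0 : Int))).getD i.toNat #[]
        = Array.replicate m.toNat (0 : Int) from by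
      rw [pvArr_getD _ i.toNat #[] (by rw [Array.size_replicate]; omega),
        Array.getElem_replicate]]
    rw [pvArr_getD _ j.toNat (0 : Int) (by rw [Array.size_replicate]; omega),
      Array.getElem_replicate]

lemma pvG1A_rel (n m : Int) (hn : 1 ≤ n) (hm : 1 ≤ m) : pvRel n m (pvG1A n m) (pvG1 n m) := by
  rw [pvG1A, pvG1]
  exact pvFold_rel n m (pvS n m) (fun c hc => ((mem_pvS n m hn hm c).mp hc).1) _ _ _
    (pvRel_init n m)

lemma pvG1_nonneg (n m : Int) (hn : 1 ≤ n) (hm : 1 ≤ m) : ∀ x, 0 ≤ pvG1 n m x := by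
  intro x
  rw [pvG1_eq]
  split <;> omega

lemma pvGetFinal (n m : Int) (hn : 1 ≤ n) (hm : 1 ≤ m) (hnot : ¬(n = 1 ∧ m = 1))
    (c : Int × Int) (hc : pvIn n m c) :
    pvGet (pvBFS n m (2 * (n.toNat * m.toNat) + 4) (pvG1A n m) (pvS n m)) c = pvF n m c := by
  rw [pvBFS_sim n m _ _ _ _ (pvG1A_rel n m hn hm)
    (fun e he => ((mem_pvS n m hn hm e).mp he).1) (pvG1_nonneg n m hn hm) c hc]
  exact pvGridFinal n m hn hm hnot c hc

-- ----- the list of closed-form values, row-major -----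
def pvLF (n m : Int) : List Int :=
  (PySem.List.pyRange 0 n).flatMap (fun i => (PySem.List.pyRange 0 m).map (fun j => pvF n m (i, j)))

lemma pvLF_bounds (n m : Int) (x : Int) (hx : x ∈ pvLF n m) : 0 ≤ x ∧ x < n + m := by
  rw [pvLF, List.mem_flatMap] at hx
  obtain ⟨i, hi, hx⟩ := hx
  rw [List.mem_map] at hx
  obtain ⟨j, hj, rfl⟩ := hx
  rw [PySem.List.mem_pyRange_one] at hi hj
  have hin : pvIn n m (i, j) := ⟨hi.1, hi.2, hj.1, hj.2⟩
  exact ⟨pvF_nonneg n m (i, j) hin, pvF_lt n m (i, j) hin⟩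

-- ----- generic fold shapes -----
lemma foldl_append_acc {a b : Type} (l : List a) (f : a → List b) (init : List b) :
    l.foldl (fun acc x => acc ++ f x) init = init ++ l.flatMap f := by
  induction l generalizing init with
  | nil => simp
  | cons x l ih => simp [ih]

lemma foldl_append_singleton {a b : Type} (l : List a) (f : a → b) (init : List b) :
    l.foldl (fun acc x => acc ++ [f x]) init = init ++ l.map f := by
  induction l generalizing init with
  | nil => simp
  | cons x l ih => simp [ih]

lemma nested_foldl_append {b : Type} (X Y : List Int) (v : Int → Int → b) (init : List b) :
    X.foldl (fun a i => Y.foldl (fun a j => a ++ [v i j]) a) init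
      = init ++ X.flatMap (fun i => Y.map (v i)) := by
  induction X generalizing init with
  | nil => simp
  | cons x X ih =>
    rw [List.foldl_cons, foldl_append_singleton, ih, List.flatMap_cons, List.append_assoc]

lemma nested_foldl_step {s : Type} (X Y : List Int) (step : s → Int → s) (v : Int → Int → Int)
    (init : s) :
    X.foldl (fun d i => Y.foldl (fun d j => step d (v i j)) d) init
      = (X.flatMap (fun i => Y.map (v i))).foldl step init := by
  induction X generalizing init with
  | nil => simp
  | cons x X ih => simp [List.foldl_append, List.foldl_map, ih]

lemma flatMap_congr {a b : Type} (l : List a) (f g : a → List b)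
    (h : ∀ x ∈ l, f x = g x) : l.flatMap f = l.flatMap g := by
  induction l with
  | nil => rfl
  | cons x l ih => simp only [List.flatMap_cons, h x (by simp), ih fun y hy => h y (by simp [hy])]

-- ----- counting sort facts -----
lemma count_flat_replicate (a b : Int) (k : Int → Nat) (x : Int) :
    ((PySem.List.pyRange a b).flatMap (fun v => List.replicate (k v) v)).count x
      = if a ≤ x ∧ x < b then k x else 0 := by
  induction h : (b - a).toNat generalizing a with
  | zero =>
    rw [PySem.List.pyRange_one_eq_nil (by omega)]
    simp only [List.flatMap_nil, List.count_nil]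
    rw [if_neg (by omega)]
  | succ l ih =>
    rw [PySem.List.pyRange_one_cons (by omega), List.flatMap_cons, List.count_append,
      List.count_replicate, ih (a + 1) (by omega)]
    by_cases hx : x = a
    · subst hx
      rw [if_pos (by simp), if_neg (by omega), if_pos (by omega)]
      omega
    · rw [if_neg (by simpa using fun h => hx h.symm)]
      by_cases hr : a + 1 ≤ x ∧ x < b
      · rw [if_pos hr, if_pos (by omega)]
        omega
      · rw [if_neg hr, if_neg (by omega)]

lemma pairwise_flat_replicate (a b : Int) (k : Int → Nat) :
    ((PySem.List.pyRange a b).flatMap (fun v => List.replicate (k v) v)).Pairwise (· ≤ ·) := by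
  induction h : (b - a).toNat generalizing a with
  | zero =>
    rw [PySem.List.pyRange_one_eq_nil (by omega)]
    simp
  | succ l ih =>
    rw [PySem.List.pyRange_one_cons (by omega), List.flatMap_cons]
    rw [List.pairwise_append]
    refine ⟨List.pairwise_replicate.mpr (by simp), ih (a + 1) (by omega), ?_⟩
    intro x hx y hy
    have hxa : x = a := List.eq_of_mem_replicate hx
    rw [List.mem_flatMap] at hy
    obtain ⟨v, hv, hy⟩ := hy
    have hyv : y = v := List.eq_of_mem_replicate hy
    rw [PySem.List.mem_pyRange_one] at hv
    omega

lemma pvSorted (n m : Int) :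
    PySem.List.sorted (pvLF n m) (fun x => x)
      = (PySem.List.pyRange 0 (n + m)).flatMap
          (fun v => List.replicate ((pvLF n m).count v) v) := by
  apply PySem.List.sorted_id_eq_of_perm_of_pairwise
  · rw [List.perm_iff_count]
    intro x
    rw [count_flat_replicate]
    by_cases hx : 0 ≤ x ∧ x < n + m
    · rw [if_pos hx]
    · rw [if_neg hx]
      exact (List.count_eq_zero.mpr fun hmem => hx (pvLF_bounds n m x hmem)).symm
  · exact pairwise_flat_replicate 0 (n + m) _

-- ----- assembling both sides -----
lemma solve_alt_eq (n m : Int) :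
    solve_alt n m = PySem.Str.join " "
      ((PySem.List.pyRange 0 (n + m)).flatMap
        (fun v => List.replicate ((pvLF n m).count v) (PySem.Int.toStr v))) := by
  rw [show solve_alt n m = PySem.Str.join " "
      ((PySem.List.pyRange 0 (n + m)).foldl
        (fun out v => out ++ PySem.List.pyRepeat [PySem.Int.toStr v]
          (((PySem.List.pyRange 0 n).foldl
            (fun (cnt : PySem.Dict Int Int) i =>
              (PySem.List.pyRange 0 m).foldl
                (fun cnt j => cnt.insert (pvF n m (i, j)) (cnt.getD (pvF n m (i, j)) 0 + 1)) cnt)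
            PySem.Dict.empty).getD v 0)) []) from rfl]
  rw [nested_foldl_step (PySem.List.pyRange 0 n) (PySem.List.pyRange 0 m)
      (fun (d : PySem.Dict Int Int) x => d.insert x (d.getD x 0 + 1)) (fun i j => pvF n m (i, j))
      PySem.Dict.empty]
  rw [show ((PySem.List.pyRange 0 n).flatMap
      (fun i => (PySem.List.pyRange 0 m).map (fun j => pvF n m (i, j)))) = pvLF n m from rfl]
  rw [PySem.Dict.foldl_insert_getD_add_one_eq_counter]
  rw [foldl_append_acc, List.nil_append]
  congr 1
  apply flatMap_congr
  intro v _
  rw [PySem.List.pyRepeat_singleton, PySem.Dict.getD_counter, Int.toNat_natCast]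

lemma solve_eq_main (n m : Int) (hn : 1 ≤ n) (hm : 1 ≤ m) (hnot : ¬(n = 1 ∧ m = 1)) :
    solve n m = solve_alt n m := by
  rw [show solve n m = PySem.Str.join " "
      ((PySem.List.sorted
        ((PySem.List.pyRange 0 n).foldl
          (fun a i => (PySem.List.pyRange 0 m).foldl
            (fun a j => a ++ [pvGet (pvBFS n m (2 * (n.toNat * m.toNat) + 4) (pvG1A n m) (pvS n m)) (i, j)]) a) [])
        (fun x => x)).map PySem.Int.toStr) from rfl]
  rw [nested_foldl_append, List.nil_append]
  rw [show ((PySem.List.pyRange 0 n).flatMap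
      (fun i => (PySem.List.pyRange 0 m).map
        (fun j => pvGet (pvBFS n m (2 * (n.toNat * m.toNat) + 4) (pvG1A n m) (pvS n m)) (i, j)))) = pvLF n m from ?_]
  · rw [pvSorted, solve_alt_eq]
    congr 1
    simp [List.map_flatMap]
  · rw [pvLF]
    apply flatMap_congr
    intro i hi
    apply List.map_congr_left
    intro j hj
    rw [PySem.List.mem_pyRange_one] at hi hj
    exact pvGetFinal n m hn hm hnot (i, j) ⟨hi.1, hi.2, hj.1, hj.2⟩

lemma solve_eq (n m : Int) (hn : 1 ≤ n) (hm : 1 ≤ m) : solve n m = solve_alt n m := by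
  by_cases h11 : n = 1 ∧ m = 1
  · obtain ⟨rfl, rfl⟩ := h11
    decide
  · exact solve_eq_main n m hn hm h11

-- ===== VERDICT (by name: the statement is the Claim_ definition above) =====
theorem solve_spec : Claim_equal_solve := by
  intro n m _ hpre
  unfold Spec_solve
  exact solve_eq n m hpre.1 hpre.2
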